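-- pv_equiv track=rewrite | github.com/minseond/YEJI | ai/ai/src/yeji_ai/services/compatibility_service.py | calc_branch_relation_score
-- ===== SOURCE A (Python) =====
-- JI_JI_YUKAP = [("JA", "CHUK"), ("IN", "HAE"), ("MYO", "SUL"), ("JIN", "YU"), ("SA", "SHIN"), ("O", "MI")]
--
-- JI_JI_SAMHAP = [("IN", "O", "SUL"), ("HAE", "MYO", "MI"), ("SHIN", "JA", "JIN"), ("SA", "YU", "CHUK")]
--
-- JI_JI_CHUNG = [("JA", "O"), ("CHUK", "MI"), ("IN", "SHIN"), ("MYO", "YU"), ("JIN", "SUL"), ("SA", "HAE")]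
--
-- def calc_branch_relation_score(ji1: str, ji2: str) -> int:
--     """지지 충합 점수 (15점 만점)"""
--     for pair in JI_JI_YUKAP:
--         if (ji1, ji2) in [pair, pair[::-1]]:
--             return 15
--     for trio in JI_JI_SAMHAP:
--         if ji1 in trio and ji2 in trio:
--             return 12
--     for pair in JI_JI_CHUNG:
--         if (ji1, ji2) in [pair, pair[::-1]]:
--             return 5
--     return 10
-- ===== SOURCE B (Python) =====
-- JI_JI_YUKAP = [("JA", "CHUK"), ("IN", "HAE"), ("MYO", "SUL"), ("JIN", "YU"), ("SA", "SHIN"), ("O", "MI")]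
--
-- JI_JI_SAMHAP = [("IN", "O", "SUL"), ("HAE", "MYO", "MI"), ("SHIN", "JA", "JIN"), ("SA", "YU", "CHUK")]
--
-- JI_JI_CHUNG = [("JA", "O"), ("CHUK", "MI"), ("IN", "SHIN"), ("MYO", "YU"), ("JIN", "SUL"), ("SA", "HAE")]
--
-- # Score table built once; later writes win, so insertion order chung < samhap < yukap
-- # reproduces A's yukap > samhap > chung priority.
-- _SCORES = {}
-- for a, b in JI_JI_CHUNG:
--     _SCORES[(a, b)] = 5
--     _SCORES[(b, a)] = 5
-- for trio in JI_JI_SAMHAP: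
--     for x in trio:
--         for y in trio:
--             _SCORES[(x, y)] = 12
-- for a, b in JI_JI_YUKAP:
--     _SCORES[(a, b)] = 15
--     _SCORES[(b, a)] = 15
--
-- def calc_branch_relation_score(ji1: str, ji2: str) -> int:
--     return _SCORES.get((ji1, ji2), 10)
-- ===== Notes on version B (the rewrite author's own statement) =====
-- stated objective: simpler
-- what changed: Replaces the three sequential scans over the yukap/samhap/chung lists by a score table built once at module load (lower-priority relations inserted first so later writes win), making the function body a single dict lookup with default 10.
import Mathlib
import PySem

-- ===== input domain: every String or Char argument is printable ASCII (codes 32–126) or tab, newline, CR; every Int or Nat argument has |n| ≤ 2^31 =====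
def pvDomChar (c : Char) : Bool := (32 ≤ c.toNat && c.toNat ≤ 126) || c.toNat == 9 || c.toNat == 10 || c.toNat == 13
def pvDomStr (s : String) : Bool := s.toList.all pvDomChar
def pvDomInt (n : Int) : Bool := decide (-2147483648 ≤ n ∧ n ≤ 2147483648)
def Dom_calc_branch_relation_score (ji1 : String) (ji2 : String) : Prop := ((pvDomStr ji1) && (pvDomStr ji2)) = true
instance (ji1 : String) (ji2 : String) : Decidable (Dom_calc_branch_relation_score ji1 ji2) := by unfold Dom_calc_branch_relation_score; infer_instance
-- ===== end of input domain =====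

set_option maxRecDepth 4000


-- B replaces A's three sequential list scans by a score table built once (a dict keyed by
-- ordered branch pairs, lower-priority relations inserted first) and a single lookup.

def JI_JI_YUKAP : List (String × String) :=
  [("JA", "CHUK"), ("IN", "HAE"), ("MYO", "SUL"), ("JIN", "YU"), ("SA", "SHIN"), ("O", "MI")]

def JI_JI_SAMHAP : List (String × String × String) :=
  [("IN", "O", "SUL"), ("HAE", "MYO", "MI"), ("SHIN", "JA", "JIN"), ("SA", "YU", "CHUK")]

def JI_JI_CHUNG : List (String × String) :=
  [("JA", "O"), ("CHUK", "MI"), ("IN", "SHIN"), ("MYO", "YU"), ("JIN", "SUL"), ("SA", "HAE")]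

-- ===== PORT A =====
def calc_branch_relation_score (ji1 : String) (ji2 : String) : Int :=
  if JI_JI_YUKAP.any (fun pair => decide ((ji1, ji2) = pair ∨ (ji1, ji2) = (pair.2, pair.1))) then 15
  else if JI_JI_SAMHAP.any (fun t =>
      decide ((ji1 = t.1 ∨ ji1 = t.2.1 ∨ ji1 = t.2.2) ∧ (ji2 = t.1 ∨ ji2 = t.2.1 ∨ ji2 = t.2.2))) then 12
  else if JI_JI_CHUNG.any (fun pair => decide ((ji1, ji2) = pair ∨ (ji1, ji2) = (pair.2, pair.1))) then 5
  else 10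

-- ===== PORT B =====
-- the module-level _SCORES table of Source B, built in the same insertion order
def pvScores : PySem.Dict (String × String) Int :=
  let d := JI_JI_CHUNG.foldl (fun d p => (d.insert (p.1, p.2) 5).insert (p.2, p.1) 5) PySem.Dict.empty
  let d := JI_JI_SAMHAP.foldl (fun d t =>
      [t.1, t.2.1, t.2.2].foldl (fun d x =>
        [t.1, t.2.1, t.2.2].foldl (fun d y => d.insert (x, y) 12) d) d) d
  JI_JI_YUKAP.foldl (fun d p => (d.insert (p.1, p.2) 15).insert (p.2, p.1) 15) d

def calc_branch_relation_score_alt (ji1 : String) (ji2 : String) : Int :=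
  pvScores.getD (ji1, ji2) 10

-- ===== PRECONDITION & SPEC =====
def Spec_calc_branch_relation_score (ji1 : String) (ji2 : String) (out : Int) : Prop := out = calc_branch_relation_score_alt ji1 ji2
instance (ji1 : String) (ji2 : String) (out : Int) : Decidable (Spec_calc_branch_relation_score ji1 ji2 out) := by unfold Spec_calc_branch_relation_score; infer_instance

-- ===== CLAIM (what is proved, stated in full; the proofs are below) =====
def Claim_equal_calc_branch_relation_score : Prop := ∀ (ji1 : String) (ji2 : String), Dom_calc_branch_relation_score ji1 ji2 → Spec_calc_branch_relation_score ji1 ji2 (calc_branch_relation_score ji1 ji2)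

-- ===== LEMMAS AND PROOFS =====

-- the twelve earthly-branch names; any pair with a component outside it scores 10 in both programs
def pvNames : List String :=
  ["JA", "CHUK", "IN", "HAE", "MYO", "SUL", "JIN", "YU", "SA", "SHIN", "O", "MI"]

theorem pv_agree_on_names :
    ∀ x ∈ pvNames, ∀ y ∈ pvNames,
      calc_branch_relation_score x y = calc_branch_relation_score_alt x y := by
  decide

theorem pv_keys_in_names :
    ∀ k ∈ pvScores.keys, k.1 ∈ pvNames ∧ k.2 ∈ pvNames := by
  decide

theorem pv_A_default {ji1 ji2 : String}
    (h : ji1 ∉ pvNames ∨ ji2 ∉ pvNames) :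
    calc_branch_relation_score ji1 ji2 = 10 := by
  rcases h with h | h <;>
  · simp only [pvNames, List.mem_cons, List.not_mem_nil, or_false, not_or] at h
    obtain ⟨h1, h2, h3, h4, h5, h6, h7, h8, h9, h10, h11, h12⟩ := h
    simp [calc_branch_relation_score, JI_JI_YUKAP, JI_JI_SAMHAP, JI_JI_CHUNG,
      Prod.ext_iff, h1, h2, h3, h4, h5, h6, h7, h8, h9, h10, h11, h12]

theorem pv_B_default {ji1 ji2 : String}
    (h : ji1 ∉ pvNames ∨ ji2 ∉ pvNames) :
    calc_branch_relation_score_alt ji1 ji2 = 10 := by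
  have hk : (ji1, ji2) ∉ pvScores.keys := by
    intro hmem
    have := pv_keys_in_names _ hmem
    rcases h with h | h
    · exact h this.1
    · exact h this.2
  have hc : pvScores.contains (ji1, ji2) = false := by
    rw [PySem.Dict.contains_eq_decide_mem_keys]
    simpa using hk
  simpa [calc_branch_relation_score_alt] using
    PySem.Dict.getD_of_not_contains (d := pvScores) (k := (ji1, ji2)) (d0 := (10 : Int)) hc

-- ===== VERDICT (by name: the statement is the Claim_ definition above) =====
theorem calc_branch_relation_score_spec : Claim_equal_calc_branch_relation_score := by
  intro ji1 ji2 _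
  unfold Spec_calc_branch_relation_score
  by_cases h1 : ji1 ∈ pvNames
  · by_cases h2 : ji2 ∈ pvNames
    · exact pv_agree_on_names ji1 h1 ji2 h2
    · rw [pv_A_default (Or.inr h2), pv_B_default (Or.inr h2)]
  · rw [pv_A_default (Or.inl h1), pv_B_default (Or.inl h1)]
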